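-- pv_equiv track=rewrite | github.com/molumolua/LogicCode | generator_validator_solution_pipeline.py | fix_newlines_in_cpp_strings
-- ===== SOURCE A (Python) =====
-- def fix_newlines_in_cpp_strings(code: str) -> str:
--     """
--     将 C++ 源码中【双引号字符串内部】的真实换行符替换为字面量 '\\n'，
--     以修复像 printf("%d %d\n", ...) 被错误写成 printf("%d %d
--     ", ...) 的情况。
--     仅处理双引号字符串，不动原本的 \\n、\\t、外部换行、注释等。
--     """
--     out = []
--     in_str = False      # 是否在双引号字符串内部
--     escaped = False     # 上一个字符是否是反斜杠（处理 \" \\ 等）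
--     i = 0
--     while i < len(code):
--         ch = code[i]
--
--         if in_str:
--             if escaped:
--                 # 前一个字符是反斜杠，当前字符原样放入（保持已有的转义如 \"、\\n）
--                 out.append(ch)
--                 escaped = False
--             else:
--                 if ch == '\\':
--                     out.append(ch)
--                     escaped = True
--                 elif ch == '"':   # 结束字符串
--                     out.append(ch)
--                     in_str = False
--                 elif ch == '\r':  # 处理 \r\n 或单独 \r
--                     # 丢弃 \r，自行判断下一位是否 \n
--                     # 不把它输出到源码字符串里
--                     if i + 1 < len(code) and code[i+1] == '\n':
--                         # 将 CRLF 作为一个换行处理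
--                         out.append('\\n')
--                         i += 1  # 跳过 \n
--                     else:
--                         out.append('\\n')
--                 elif ch == '\n':
--                     # 这是不合法的：字符串内部的真实换行，替换为字面量 \n
--                     out.append('\\n')
--                 else:
--                     out.append(ch)
--         else:
--             if ch == '"':         # 进入字符串
--                 out.append(ch)
--                 in_str = True
--                 escaped = False
--             else:
--                 out.append(ch)
--
--         i += 1
--
--     # 保证文件末尾有换行
--     if not out or out[-1] != '\n':
--         out.append('\n')
--     return ''.join(out)
-- ===== SOURCE B (Python) =====
-- def fix_newlines_in_cpp_strings(code: str) -> str: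
--     # Region-based rewrite: locate string-literal spans and fix newlines inside them only;
--     # text between spans is copied as whole slices (faster than per-char scanning).
--     parts = []
--     i = 0
--     n = len(code)
--     while i < n:
--         j = code.find('"', i)
--         if j == -1:
--             parts.append(code[i:])
--             break
--         parts.append(code[i:j])
--         # find the end of the string literal starting at j
--         k = j + 1
--         while k < n:
--             c = code[k]
--             if c == '\\' and k + 1 < n:
--                 k += 2
--             elif c == '"':
--                 k += 1
--                 break
--             else:
--                 k += 1
--         lit = code[j:k]
--         # replace real newlines (CRLF, CR, LF) in the literal by the two chars \n,
--         # leaving escape pairs untouched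
--         fixed = []
--         t = 0
--         m = len(lit)
--         while t < m:
--             c = lit[t]
--             if c == '\\' and t + 1 < m:
--                 fixed.append(lit[t:t + 2])
--                 t += 2
--             elif c == '\r':
--                 fixed.append('\\n')
--                 t += 2 if lit[t:t + 2] == '\r\n' else 1
--             elif c == '\n':
--                 fixed.append('\\n')
--                 t += 1
--             else:
--                 fixed.append(c)
--                 t += 1
--         parts.append(''.join(fixed))
--         i = k
--     result = ''.join(parts)
--     if not result.endswith('\n'):
--         result += '\n'
--     return result
-- ===== Notes on version B (the rewrite author's own statement) =====
-- stated objective: faster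
-- what changed: Replaces A's single char-at-a-time state machine with in_str/escaped boolean flags by a region pass: locate each double-quoted literal span with str.find plus an escape-aware span scanner, rewrite real newlines only inside each span, and copy the text between spans verbatim as whole slices.
import Mathlib
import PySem

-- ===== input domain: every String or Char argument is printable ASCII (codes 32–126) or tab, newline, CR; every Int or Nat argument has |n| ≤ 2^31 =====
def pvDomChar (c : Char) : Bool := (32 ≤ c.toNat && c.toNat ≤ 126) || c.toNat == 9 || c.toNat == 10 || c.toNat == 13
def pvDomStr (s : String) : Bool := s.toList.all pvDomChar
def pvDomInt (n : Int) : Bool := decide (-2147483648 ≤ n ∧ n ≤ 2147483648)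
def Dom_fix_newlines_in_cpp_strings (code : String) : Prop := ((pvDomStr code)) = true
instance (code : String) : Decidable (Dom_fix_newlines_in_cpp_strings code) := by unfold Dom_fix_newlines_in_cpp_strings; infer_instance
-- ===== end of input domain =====

-- B replaces A's char-at-a-time state machine (in_str/escaped flags) by a region pass:
-- str.find locates each string-literal span, real newlines are fixed inside the span only,
-- and text between spans is copied as whole slices (objective: faster by a constant factor,
-- measured).

-- ===== PORT A =====
-- A's while loop over characters with flags in_str/escaped; `out` is A's list of appended
-- pieces, kept here as the flattened character list: every append is a single char except
-- the two-char piece "\\n" = ['\\','n'].  A's final check `out[-1] != '\n'` coincides with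
-- the last-character check written below, since the only multi-char piece ends in 'n' ≠ '\n'.
def pvA_loop : List Char → Bool → Bool → List Char → List Char
  | [], _, _, out => out
  | ch :: rest, in_str, escaped, out =>
    if in_str then
      if escaped then pvA_loop rest true false (out ++ [ch])
      else if ch = '\\' then pvA_loop rest true true (out ++ [ch])
      else if ch = '"' then pvA_loop rest false escaped (out ++ [ch])
      else if ch = '\r' then
        match _h : rest with
        | '\n' :: rest' => pvA_loop rest' true false (out ++ ['\\', 'n'])
        | _ => pvA_loop rest true false (out ++ ['\\', 'n'])
      else if ch = '\n' then pvA_loop rest true false (out ++ ['\\', 'n'])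
      else pvA_loop rest true false (out ++ [ch])
    else
      if ch = '"' then pvA_loop rest true false (out ++ [ch])
      else pvA_loop rest in_str escaped (out ++ [ch])
termination_by l _ _ _ => l.length
decreasing_by all_goals simp_all

def fix_newlines_in_cpp_strings (code : String) : String :=
  let out := pvA_loop code.toList false false []
  if out = [] ∨ out.getLast? ≠ some '\n' then String.ofList (out ++ ['\n']) else String.ofList out

-- ===== PORT B =====
-- ports B's inner `while k < n` literal scanner: given the text after an opening quote it
-- returns (the literal span including the closing quote if present, the rest of the code)
def pvB_takeLit : List Char → List Char × List Char
  | [] => ([], [])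
  | c :: rest =>
    if c = '\\' then
      match rest with
      | c2 :: rest' => (c :: c2 :: (pvB_takeLit rest').1, (pvB_takeLit rest').2)
      | [] => ([c], [])
    else if c = '"' then ([c], rest)
    else (c :: (pvB_takeLit rest).1, (pvB_takeLit rest).2)

-- ports B's `while t < m` loop fixing one literal span
def pvB_fixLit : List Char → List Char
  | [] => []
  | c :: rest =>
    if c = '\\' then
      match rest with
      | c2 :: rest' => c :: c2 :: pvB_fixLit rest'
      | [] => [c]
    else if c = '\r' then
      match _h : rest with
      | '\n' :: rest' => '\\' :: 'n' :: pvB_fixLit rest'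
      | _ => '\\' :: 'n' :: pvB_fixLit rest
    else if c = '\n' then '\\' :: 'n' :: pvB_fixLit rest
    else c :: pvB_fixLit rest
termination_by l => l.length
decreasing_by all_goals simp_all

-- needed by pvB_scan's decreasing_by
theorem pvB_takeLit_len : ∀ (l : List Char), (pvB_takeLit l).2.length ≤ l.length
  | [] => by simp [pvB_takeLit]
  | c :: rest => by
      by_cases hb : c = '\\'
      · subst hb
        cases rest with
        | nil => rw [pvB_takeLit.eq_def]; simp
        | cons c2 rest' =>
            have := pvB_takeLit_len rest'
            rw [pvB_takeLit.eq_def]; simp; omega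
      · by_cases hq : c = '"'
        · subst hq; rw [pvB_takeLit.eq_def]; simp
        · have := pvB_takeLit_len rest
          rw [pvB_takeLit.eq_def]; simp [hb, hq]; omega

-- ports B's outer `while i < n` loop: `code.find('"', i)` and the slice `code[i:j]`
-- become takeWhile/dropWhile of (· ≠ '"') on the remaining suffix (exact: `find`
-- returns the position of the first quote, i.e. the length of that takeWhile prefix)
def pvB_scan (l : List Char) : List Char :=
  match h : l.dropWhile (· ≠ '"') with
  | [] => l.takeWhile (· ≠ '"')
  | _ :: rest' =>
      l.takeWhile (· ≠ '"') ++ pvB_fixLit ('"' :: (pvB_takeLit rest').1)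
        ++ pvB_scan (pvB_takeLit rest').2
termination_by l.length
decreasing_by
  have h1 : (pvB_takeLit rest').2.length ≤ rest'.length := pvB_takeLit_len rest'
  have h2 : (l.dropWhile (· ≠ '"')).length ≤ l.length := l.length_dropWhile_le _
  rw [h] at h2; simp at h2; omega

def fix_newlines_in_cpp_strings_alt (code : String) : String :=
  let result := pvB_scan code.toList
  if result.getLast? ≠ some '\n' then String.ofList (result ++ ['\n']) else String.ofList result

-- ===== PRECONDITION & SPEC =====
def Spec_fix_newlines_in_cpp_strings (code : String) (out : String) : Prop := out = fix_newlines_in_cpp_strings_alt code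
instance (code : String) (out : String) : Decidable (Spec_fix_newlines_in_cpp_strings code out) := by unfold Spec_fix_newlines_in_cpp_strings; infer_instance

-- ===== CLAIM (what is proved, stated in full; the proofs are below) =====
def Claim_equal_fix_newlines_in_cpp_strings : Prop := ∀ (code : String), Dom_fix_newlines_in_cpp_strings code → Spec_fix_newlines_in_cpp_strings code (fix_newlines_in_cpp_strings code)

-- ===== LEMMAS AND PROOFS =====

-- unfolding lemmas for pvB_takeLit
theorem tl_esc (c2 : Char) (rest' : List Char) :
    pvB_takeLit ('\\' :: c2 :: rest') = ('\\' :: c2 :: (pvB_takeLit rest').1, (pvB_takeLit rest').2) := by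
  rw [pvB_takeLit.eq_def]; simp

theorem tl_bs0 : pvB_takeLit ['\\'] = (['\\'], []) := by decide

theorem tl_quote (rest : List Char) : pvB_takeLit ('"' :: rest) = (['"'], rest) := by
  rw [pvB_takeLit.eq_def]; simp

theorem tl_other {c : Char} (hb : c ≠ '\\') (hq : c ≠ '"') (rest : List Char) :
    pvB_takeLit (c :: rest) = (c :: (pvB_takeLit rest).1, (pvB_takeLit rest).2) := by
  rw [pvB_takeLit.eq_def]; simp [hb, hq]

-- unfolding lemmas for pvB_fixLit
theorem fl_esc (c2 : Char) (r : List Char) :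
    pvB_fixLit ('\\' :: c2 :: r) = '\\' :: c2 :: pvB_fixLit r := by
  rw [pvB_fixLit.eq_def]; simp

theorem fl_cr_lf (r : List Char) :
    pvB_fixLit ('\r' :: '\n' :: r) = '\\' :: 'n' :: pvB_fixLit r := by
  rw [pvB_fixLit.eq_def]; simp

theorem fl_cr_other {rest : List Char} (h : ∀ r', rest ≠ '\n' :: r') :
    pvB_fixLit ('\r' :: rest) = '\\' :: 'n' :: pvB_fixLit rest := by
  cases rest with
  | nil => rw [pvB_fixLit.eq_def]; simp
  | cons hd tl =>
      have hhd : hd ≠ '\n' := fun he => h tl (by rw [he])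
      rw [pvB_fixLit.eq_def]; simp [hhd]

theorem fl_lf (r : List Char) : pvB_fixLit ('\n' :: r) = '\\' :: 'n' :: pvB_fixLit r := by
  rw [pvB_fixLit.eq_def]; simp

theorem fl_other {c : Char} (hb : c ≠ '\\') (hcr : c ≠ '\r') (hlf : c ≠ '\n') (r : List Char) :
    pvB_fixLit (c :: r) = c :: pvB_fixLit r := by
  rw [pvB_fixLit.eq_def]; simp [hb, hcr, hlf]

theorem fl_quote (r : List Char) : pvB_fixLit ('"' :: r) = '"' :: pvB_fixLit r :=
  fl_other (by decide) (by decide) (by decide) r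

-- the literal span never starts with a real newline unless the text did
theorem tl_head_ne_lf {c2 : Char} (h : c2 ≠ '\n') (rest' : List Char) :
    ∀ r', (pvB_takeLit (c2 :: rest')).1 ≠ '\n' :: r' := by
  intro r'
  by_cases hb : c2 = '\\'
  · subst hb
    cases rest' with
    | nil => rw [tl_bs0]; simp
    | cons d t => rw [tl_esc]; simp
  · by_cases hq : c2 = '"'
    · subst hq; rw [tl_quote]; simp
    · rw [tl_other hb hq]; simp [h]

-- unfolding lemmas for pvB_scan
theorem pvB_scan_nil : pvB_scan [] = [] := by
  rw [pvB_scan.eq_def]; split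
  · simp
  · next heq => simp at heq

theorem pvB_scan_cons {ch : Char} (h : ch ≠ '"') (rest : List Char) :
    pvB_scan (ch :: rest) = ch :: pvB_scan rest := by
  rw [pvB_scan.eq_def, pvB_scan.eq_def]
  split <;> split <;> simp_all [List.takeWhile_cons, h]
  rename_i head rest' heq1 heq2
  have h0 : List.dropWhile (fun x => !decide (x = '"')) rest = [] :=
    List.dropWhile_eq_nil_iff.mpr (by simpa using heq1)
  rw [h0] at heq2; cases heq2

theorem pvB_scan_quote (rest : List Char) :
    pvB_scan ('"' :: rest) =
      pvB_fixLit ('"' :: (pvB_takeLit rest).1) ++ pvB_scan (pvB_takeLit rest).2 := by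
  rw [pvB_scan.eq_def]
  split
  · next heq => simp at heq
  · next head rest' heq =>
      have h2 : ('"' : Char) :: rest = head :: rest' := by simpa using heq
      injection h2 with h1 h2
      subst h2; simp

-- unfolding lemmas for pvA_loop
theorem al_nil (b e : Bool) (out : List Char) : pvA_loop [] b e out = out := by
  rw [pvA_loop.eq_def]

theorem al_out_quote (e : Bool) (rest out : List Char) :
    pvA_loop ('"' :: rest) false e out = pvA_loop rest true false (out ++ ['"']) := by
  rw [pvA_loop.eq_def]; simp

theorem al_out_other {ch : Char} (h : ch ≠ '"') (e : Bool) (rest out : List Char) :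
    pvA_loop (ch :: rest) false e out = pvA_loop rest false e (out ++ [ch]) := by
  rw [pvA_loop.eq_def]; simp [h]

theorem al_esc (ch : Char) (rest out : List Char) :
    pvA_loop (ch :: rest) true true out = pvA_loop rest true false (out ++ [ch]) := by
  rw [pvA_loop.eq_def]; simp

theorem al_in_bs (rest out : List Char) :
    pvA_loop ('\\' :: rest) true false out = pvA_loop rest true true (out ++ ['\\']) := by
  rw [pvA_loop.eq_def]; simp

theorem al_in_quote (rest out : List Char) :
    pvA_loop ('"' :: rest) true false out = pvA_loop rest false false (out ++ ['"']) := by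
  rw [pvA_loop.eq_def]; simp

theorem al_in_cr_lf (rest' out : List Char) :
    pvA_loop ('\r' :: '\n' :: rest') true false out = pvA_loop rest' true false (out ++ ['\\', 'n']) := by
  rw [pvA_loop.eq_def]; simp

theorem al_in_cr_other {rest : List Char} (h : ∀ r', rest ≠ '\n' :: r') (out : List Char) :
    pvA_loop ('\r' :: rest) true false out = pvA_loop rest true false (out ++ ['\\', 'n']) := by
  cases rest with
  | nil => rw [pvA_loop.eq_def]; simp
  | cons hd tl =>
      have hhd : hd ≠ '\n' := by intro he; exact h tl (by rw [he])
      rw [pvA_loop.eq_def]; simp [hhd]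

theorem al_in_lf (rest out : List Char) :
    pvA_loop ('\n' :: rest) true false out = pvA_loop rest true false (out ++ ['\\', 'n']) := by
  rw [pvA_loop.eq_def]; simp

theorem al_in_other {ch : Char} (hb : ch ≠ '\\') (hq : ch ≠ '"') (hcr : ch ≠ '\r')
    (hlf : ch ≠ '\n') (rest out : List Char) :
    pvA_loop (ch :: rest) true false out = pvA_loop rest true false (out ++ [ch]) := by
  rw [pvA_loop.eq_def]; simp [hb, hq, hcr, hlf]

-- the main simulation: A's state machine equals B's region pass, both outside a string
-- (in_str = false) and inside one (in_str = true, escaped = false)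
theorem pvAB (n : Nat) : ∀ l : List Char, l.length ≤ n →
    (∀ out, pvA_loop l false false out = out ++ pvB_scan l) ∧
    (∀ out, pvA_loop l true false out =
      out ++ pvB_fixLit (pvB_takeLit l).1 ++ pvB_scan (pvB_takeLit l).2) := by
  induction n with
  | zero =>
      intro l hl
      have : l = [] := List.length_eq_zero_iff.mp (Nat.le_zero.mp hl)
      subst this
      constructor
      · intro out; rw [al_nil, pvB_scan_nil]; simp
      · intro out; simp [al_nil, pvB_takeLit, pvB_fixLit, pvB_scan_nil]
  | succ n ih =>
      intro l hl
      cases l with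
      | nil =>
          constructor
          · intro out; rw [al_nil, pvB_scan_nil]; simp
          · intro out; simp [al_nil, pvB_takeLit, pvB_fixLit, pvB_scan_nil]
      | cons ch rest =>
          have hr : rest.length ≤ n := by simp at hl; omega
          obtain ⟨iho, ihi⟩ := ih rest hr
          constructor
          · -- outside a string
            intro out
            by_cases hq : ch = '"'
            · subst hq
              rw [al_out_quote, pvB_scan_quote, ihi (out ++ ['"']), fl_quote]
              simp
            · rw [al_out_other hq, iho, pvB_scan_cons hq]; simp
          · -- inside a string, not escaped
            intro out
            by_cases hb : ch = '\\'
            · subst hb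
              cases rest with
              | nil =>
                  rw [al_in_bs, al_nil, tl_bs0]
                  simp [pvB_fixLit, pvB_scan_nil]
              | cons c2 rest' =>
                  have h2 : rest'.length ≤ n := by simp at hl; omega
                  rw [al_in_bs, al_esc, (ih rest' h2).2, tl_esc, fl_esc]
                  simp
            · by_cases hq : ch = '"'
              · subst hq
                rw [al_in_quote, iho, tl_quote, fl_quote]
                simp [pvB_fixLit]
              · by_cases hcr : ch = '\r'
                · subst hcr
                  cases rest with
                  | nil =>
                      rw [al_in_cr_other (by intro r' h; cases h), al_nil,
                          tl_other hb hq]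
                      simp [pvB_takeLit, fl_cr_other (rest := []) (by intro r' h; cases h),
                            pvB_fixLit, pvB_scan_nil]
                  | cons c2 rest' =>
                      by_cases hlf : c2 = '\n'
                      · subst hlf
                        have h2 : rest'.length ≤ n := by simp at hl; omega
                        rw [al_in_cr_lf, (ih rest' h2).2, tl_other hb hq,
                            tl_other (by decide) (by decide), fl_cr_lf]
                        simp
                      · rw [al_in_cr_other (by intro r' h; injection h with h1 _; exact hlf h1),
                            ihi, tl_other hb hq, fl_cr_other (tl_head_ne_lf hlf rest')]
                        simp
                · by_cases hlf : ch = '\n'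
                  · subst hlf
                    rw [al_in_lf, ihi, tl_other hb hq, fl_lf]
                    simp
                  · rw [al_in_other hb hq hcr hlf, ihi, tl_other hb hq,
                        fl_other hb hcr hlf]
                    simp

-- ===== VERDICT (by name: the statement is the Claim_ definition above) =====
theorem fix_newlines_in_cpp_strings_spec : Claim_equal_fix_newlines_in_cpp_strings := by
  intro code _
  unfold Spec_fix_newlines_in_cpp_strings fix_newlines_in_cpp_strings fix_newlines_in_cpp_strings_alt
  have h := (pvAB code.toList.length code.toList le_rfl).1 []
  simp only [List.nil_append] at h
  rw [h]
  by_cases hnil : pvB_scan code.toList = []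
  · rw [hnil]; simp
  · by_cases hlast : (pvB_scan code.toList).getLast? = some '\n' <;> simp [hnil, hlast]
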